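-- pv_equiv track=rewrite | github.com/agnJason/PianoMotion10M | datasets/utils.py | find_unshowed
-- ===== SOURCE A (Python) =====
-- def find_unshowed(is_missed, threshold=15):
--     is_missed = is_missed.copy()
--     unshowed_idx = []
--     count_missed = 0
--     tmp_idx = []
--     for idx, value in enumerate(is_missed):
--         if value == 0:
--             if count_missed >= threshold:
--                 unshowed_idx = unshowed_idx + tmp_idx
--             count_missed = 0
--             tmp_idx = []
--         if value == 1:
--             count_missed += 1
--             tmp_idx.append(idx)
--     if count_missed >= threshold:
--         unshowed_idx = unshowed_idx + tmp_idx
--     return unshowed_idx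
-- ===== SOURCE B (Python) =====
-- def find_unshowed(is_missed, threshold=15):
--     is_missed = is_missed.copy()
--     # run id of position i = number of zeros in is_missed[:i+1]; ones in the same
--     # maximal zero-free run share a run id, ones in different runs never do.
--     run_id = []
--     zeros = 0
--     for v in is_missed:
--         if v == 0:
--             zeros += 1
--         run_id.append(zeros)
--     # count the ones in each run with a counter keyed by run id
--     keys = [run_id[i] for i, v in enumerate(is_missed) if v == 1]
--     counts = {}
--     for k in keys:
--         counts[k] = counts.get(k, 0) + 1
--     # a position is reported iff it holds a 1 and its run has enough ones
--     return [i for i, v in enumerate(is_missed)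
--             if v == 1 and counts[run_id[i]] >= threshold]
-- ===== Notes on version B (the rewrite author's own statement) =====
-- stated objective: alternative
-- what changed: B assigns every position a run id (zeros seen so far), builds a counter of ones per run id, and emits a position iff it holds a 1 and its run id's count meets the threshold - a pointwise membership test via a hash counter instead of A's streaming pass that accumulates and flushes tentative index runs.
import Mathlib
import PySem

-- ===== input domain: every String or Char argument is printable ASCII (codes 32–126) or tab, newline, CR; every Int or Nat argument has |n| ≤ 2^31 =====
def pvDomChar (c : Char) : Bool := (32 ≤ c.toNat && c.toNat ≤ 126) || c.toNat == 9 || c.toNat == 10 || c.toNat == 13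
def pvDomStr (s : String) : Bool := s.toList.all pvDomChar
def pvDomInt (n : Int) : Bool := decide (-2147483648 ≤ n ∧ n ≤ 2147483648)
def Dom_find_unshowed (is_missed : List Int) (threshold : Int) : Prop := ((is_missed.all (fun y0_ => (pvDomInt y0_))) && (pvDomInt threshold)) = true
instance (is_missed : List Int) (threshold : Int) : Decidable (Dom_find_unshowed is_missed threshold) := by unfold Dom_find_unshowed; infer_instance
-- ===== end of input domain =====

-- B tags each position with a run id (zeros seen so far), counts ones per run id in a dict,
-- and keeps a position iff it holds a 1 and its run's count meets the threshold (objective: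
-- alternative pointwise algorithm); A = B on all inputs (both total).


-- ===== PORT A =====
-- literal transliteration of A: one pass with (unshowed_idx, count_missed, tmp_idx) state
def find_unshowed (is_missed : List Int) (threshold : Int) : List Int :=
  let st := (PySem.List.enumerate is_missed).foldl
    (fun (st : List Int × Int × List Int) (p : Int × Int) =>
      let (unshowed_idx, count_missed, tmp_idx) := st
      let (idx, value) := p
      let (unshowed_idx, count_missed, tmp_idx) :=
        if value == 0 then
          ((if count_missed ≥ threshold then unshowed_idx ++ tmp_idx else unshowed_idx),
           0, ([] : List Int))
        else (unshowed_idx, count_missed, tmp_idx)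
      if value == 1 then (unshowed_idx, count_missed + 1, tmp_idx ++ [idx])
      else (unshowed_idx, count_missed, tmp_idx))
    ([], 0, [])
  if st.2.1 ≥ threshold then st.1 ++ st.2.2 else st.1

-- ===== PORT B =====
-- literal transliteration of B (Source B): run-id list, counter of ones per run id, pointwise filter.
-- Python's in-range list indexing run_id[i] and dict lookup counts[run_id[i]] (the key is always
-- present when v == 1) are ported with pyGetD / Dict.getD, exact on those in-range/present uses.
def find_unshowed_alt (is_missed : List Int) (threshold : Int) : List Int :=
  let run_id := (is_missed.foldl
    (fun (st : List Int × Int) v =>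
      let zeros := if v == 0 then st.2 + 1 else st.2
      (st.1 ++ [zeros], zeros))
    ([], 0)).1
  let keys := ((PySem.List.enumerate is_missed).filter (fun p => p.2 == 1)).map
    (fun p => PySem.List.pyGetD run_id p.1 0)
  let counts := keys.foldl (fun (d : PySem.Dict Int Int) k => d.insert k (d.getD k 0 + 1))
    PySem.Dict.empty
  ((PySem.List.enumerate is_missed).filter
      (fun p => p.2 == 1 && decide (counts.getD (PySem.List.pyGetD run_id p.1 0) 0 ≥ threshold))).map
    (fun p => p.1)

-- ===== PRECONDITION & SPEC =====
def Spec_find_unshowed (is_missed : List Int) (threshold : Int) (out : List Int) : Prop := out = find_unshowed_alt is_missed threshold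
instance (is_missed : List Int) (threshold : Int) (out : List Int) : Decidable (Spec_find_unshowed is_missed threshold out) := by unfold Spec_find_unshowed; infer_instance

-- ===== CLAIM (what is proved, stated in full; the proofs are below) =====
def Claim_equal_find_unshowed : Prop := ∀ (is_missed : List Int) (threshold : Int), Dom_find_unshowed is_missed threshold → Spec_find_unshowed is_missed threshold (find_unshowed is_missed threshold)

-- ===== LEMMAS AND PROOFS =====

-- zc l i = number of zeros among the first i entries (the run id of position i, as an Int)
def zc (l : List Int) (i : Nat) : Int := ((l.take i).count 0 : Int)

-- cntKey l k = number of ones whose run id is k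
def cntKey (l : List Int) (k : Int) : Int :=
  (((((List.range l.length).filter (fun j => l.getD j 0 == 1)).map (fun j => zc l j)).count k : Nat) : Int)

-- closed pointwise form of B, generalized with an offset and e extra ones credited to run id 0
def Pgen (t off e : Int) (l : List Int) : List Int :=
  ((List.range l.length).filter
      (fun i => l.getD i 0 == 1 && decide (cntKey l (zc l i) + (if zc l i = 0 then e else 0) ≥ t))).map
    (fun i : Nat => off + (i : Int))

-- the zero-separated runs of one-indices: first (open at the left context) run and the rest
def segs (off : Int) : List Int → List Int × List (List Int)
  | [] => ([], [])
  | v :: rest =>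
    let p := segs (off + 1) rest
    if v = 0 then ([], p.1 :: p.2)
    else if v = 1 then (off :: p.1, p.2) else p

def pvF (t : Int) (run : List Int) : List Int := if (run.length : Int) ≥ t then run else []

-- segment form of the common value, with e extra ones credited to the first (open) run
def specGen (t off e : Int) (l : List Int) : List Int :=
  (if e + (((segs off l).1.length : Nat) : Int) ≥ t then (segs off l).1 else []) ++
    (segs off l).2.flatMap (pvF t)

-- A's fold step, named (definitionally the lambda in the port)
def pvStepA (threshold : Int) (st : List Int × Int × List Int) (p : Int × Int) :
    List Int × Int × List Int :=
  let (unshowed_idx, count_missed, tmp_idx) := st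
  let (idx, value) := p
  let (unshowed_idx, count_missed, tmp_idx) :=
    if value == 0 then
      ((if count_missed ≥ threshold then unshowed_idx ++ tmp_idx else unshowed_idx),
       0, ([] : List Int))
    else (unshowed_idx, count_missed, tmp_idx)
  if value == 1 then (unshowed_idx, count_missed + 1, tmp_idx ++ [idx])
  else (unshowed_idx, count_missed, tmp_idx)

theorem zc_zero (l : List Int) : zc l 0 = 0 := by simp [zc]

theorem zc_nonneg (l : List Int) (i : Nat) : 0 ≤ zc l i := by
  simp [zc]

theorem zc_cons_succ (v : Int) (rest : List Int) (i : Nat) :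
    zc (v :: rest) (i + 1) = (if v = 0 then 1 else 0) + zc rest i := by
  unfold zc
  simp only [List.take_succ_cons, List.count_cons]
  by_cases h : v = 0 <;> simp [h] <;> push_cast <;> ring

theorem cntKey_neg (l : List Int) (k : Int) (hk : k < 0) : cntKey l k = 0 := by
  unfold cntKey
  have : k ∉ (((List.range l.length).filter (fun j => l.getD j 0 == 1)).map (fun j => zc l j)) := by
    intro hm
    rcases List.mem_map.1 hm with ⟨j, _, hj⟩
    have := zc_nonneg l j
    omega
  simp only [List.count_eq_zero.2 this, Nat.cast_zero]

theorem cntKey_cons (v : Int) (rest : List Int) (k : Int) :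
    cntKey (v :: rest) k =
      (if v = 1 ∧ k = 0 then 1 else 0) + cntKey rest (k - (if v = 0 then 1 else 0)) := by
  have hmap : (List.filter (fun j => (v :: rest).getD j 0 == 1)
        ((List.range rest.length).map Nat.succ)).map (fun j => zc (v :: rest) j)
      = ((List.range rest.length).filter (fun j => rest.getD j 0 == 1)).map
          (fun j => (if v = 0 then 1 else 0) + zc rest j) := by
    rw [List.filter_map, List.map_map]
    rw [show ((fun j => (v :: rest).getD j 0 == 1) ∘ Nat.succ) = (fun j => rest.getD j 0 == 1) by
      funext j; simp [Function.comp]]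
    exact List.map_congr_left (fun j _ => by
      simp [Function.comp, Nat.succ_eq_add_one, zc_cons_succ])
  have hcount : ∀ (xs : List Nat) (a : Int),
      ((xs.map (fun j => a + zc rest j)).count k : Int)
        = ((xs.map (fun j => zc rest j)).count (k - a) : Int) := by
    intro xs a
    simp only [List.count_eq_countP, List.countP_map]
    congr 1
    apply List.countP_congr
    intro j _
    simp only [Function.comp]
    constructor <;> (intro h; have := eq_of_beq h; exact beq_iff_eq.2 (by omega))
  unfold cntKey
  rw [List.length_cons, List.range_succ_eq_map, List.filter_cons]
  by_cases hv1 : v = 1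
  · subst hv1
    rw [if_pos (by simp)]
    rw [List.map_cons, List.count_cons, hmap]
    push_cast [hcount]
    rw [show zc ((1:Int) :: rest) 0 = 0 from zc_zero _]
    norm_num
    by_cases hk : k = 0
    · simp [hk]
      omega
    · simp [hk, Ne.symm hk]
  · rw [if_neg (by simp [hv1]), hmap, hcount]
    simp [hv1]

theorem cntKey_cons_zero (rest : List Int) (k : Int) :
    cntKey (0 :: rest) k = cntKey rest (k - 1) := by
  rw [cntKey_cons]; norm_num

theorem cntKey_cons_one (rest : List Int) (k : Int) :
    cntKey (1 :: rest) k = (if k = 0 then 1 else 0) + cntKey rest k := by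
  rw [cntKey_cons]; norm_num

theorem cntKey_cons_other (v : Int) (rest : List Int) (k : Int) (h0 : v ≠ 0) (h1 : v ≠ 1) :
    cntKey (v :: rest) k = cntKey rest k := by
  rw [cntKey_cons]; simp [h0, h1]

theorem cntKey_nil (k : Int) : cntKey [] k = 0 := by
  simp [cntKey]

theorem segs_fst_len (l : List Int) : ∀ off : Int, (((segs off l).1.length : Nat) : Int) = cntKey l 0 := by
  induction l with
  | nil => intro off; simp [segs, cntKey_nil]
  | cons v rest ih =>
      intro off
      by_cases hv0 : v = 0
      · subst hv0
        rw [cntKey_cons_zero]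
        rw [show (0:Int) - 1 = -1 by omega, cntKey_neg rest (-1) (by omega)]
        simp [segs]
      · by_cases hv1 : v = 1
        · subst hv1
          rw [cntKey_cons_one]
          simp [segs, hv0, ← ih (off + 1)]
          omega
        · rw [cntKey_cons_other v rest 0 hv0 hv1]
          simp [segs, hv0, hv1, ih (off + 1)]

theorem Pgen_cons (v : Int) (rest : List Int) (t off e : Int) :
    Pgen t off e (v :: rest) =
      (if (v == 1 && decide (cntKey (v :: rest) 0 + e ≥ t)) = true then [off] else []) ++
        Pgen t (off + 1) (if v = 0 then 0 else if v = 1 then e + 1 else e) rest := by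
  unfold Pgen
  rw [List.length_cons, List.range_succ_eq_map, List.filter_cons]
  have hpred : ((fun i => (v :: rest).getD i 0 == 1 &&
        decide (cntKey (v :: rest) (zc (v :: rest) i) + (if zc (v :: rest) i = 0 then e else 0) ≥ t)) ∘
        Nat.succ)
      = (fun j => rest.getD j 0 == 1 &&
          decide (cntKey rest (zc rest j) +
            (if zc rest j = 0 then (if v = 0 then 0 else if v = 1 then e + 1 else e) else 0) ≥ t)) := by
    funext j
    simp only [Function.comp, Nat.succ_eq_add_one, List.getD_cons_succ, zc_cons_succ]
    by_cases hv0 : v = 0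
    · subst hv0
      have hz : ¬ ((1 : Int) + zc rest j = 0) := by have := zc_nonneg rest j; omega
      have hck : cntKey ((0:Int) :: rest) (1 + zc rest j) = cntKey rest (zc rest j) := by
        rw [cntKey_cons_zero]; congr 1; ring
      simp [hz, hck]
    · by_cases hv1 : v = 1
      · subst hv1
        by_cases hz : zc rest j = 0
        · simp only [hz, cntKey_cons_one]
          cases hb : (rest.getD j 0 == 1) <;> simp [hb]
          omega
        · simp [hz, cntKey_cons_one]
      · simp [hv0, hv1, cntKey_cons_other v rest _ hv0 hv1]
  have hhead : ((v :: rest).getD 0 0 == 1 &&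
        decide (cntKey (v :: rest) (zc (v :: rest) 0) + (if zc (v :: rest) 0 = 0 then e else 0) ≥ t))
      = (v == 1 && decide (cntKey (v :: rest) 0 + e ≥ t)) := by
    simp [zc_zero]
  rw [hhead]
  split
  · rw [List.map_cons, List.filter_map, List.map_map, hpred]
    simp only [Nat.cast_zero, add_zero, List.cons_append, List.singleton_append]
    congr 1
    apply List.map_congr_left
    intro j _
    simp only [Function.comp, Nat.succ_eq_add_one]
    push_cast
    ring
  · rw [List.filter_map, List.map_map, hpred]
    simp only [List.nil_append]
    apply List.map_congr_left
    intro j _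
    simp only [Function.comp, Nat.succ_eq_add_one]
    push_cast
    ring

theorem Pgen_eq_specGen (l : List Int) : ∀ t off e : Int, Pgen t off e l = specGen t off e l := by
  induction l with
  | nil =>
      intro t off e
      simp [Pgen, specGen, segs, apply_ite (fun r : List Int => r ++ [])]
  | cons v rest ih =>
      intro t off e
      rw [Pgen_cons]
      by_cases hv0 : v = 0
      · subst hv0
        rw [show (if (0:Int) = 0 then (0:Int) else if (0:Int) = 1 then e + 1 else e) = 0 by
          norm_num]
        rw [ih t (off + 1) 0]
        have hsegs : segs off ((0:Int) :: rest)
            = ([], (segs (off + 1) rest).1 :: (segs (off + 1) rest).2) := by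
          simp [segs]
        rw [show (((0:Int) == 1 && decide (cntKey ((0:Int) :: rest) 0 + e ≥ t))) = false by simp]
        simp only [specGen, hsegs, List.length_nil, Nat.cast_zero, ite_self, List.nil_append,
          List.flatMap_cons, pvF, Bool.false_eq_true, if_false, zero_add]
      · by_cases hv1 : v = 1
        · subst hv1
          rw [show (if (1:Int) = 0 then (0:Int) else if (1:Int) = 1 then e + 1 else e) = e + 1 by
            norm_num]
          rw [ih t (off + 1) (e + 1)]
          have hck : cntKey ((1:Int) :: rest) 0 = 1 + cntKey rest 0 := by
            rw [cntKey_cons_one]; norm_num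
          have hlen := segs_fst_len rest (off + 1)
          have hsegs : segs off ((1:Int) :: rest)
              = (off :: (segs (off + 1) rest).1, (segs (off + 1) rest).2) := by
            simp [segs]
          simp only [specGen, hsegs]
          by_cases hC : e + 1 + (((segs (off + 1) rest).1.length : Nat) : Int) ≥ t
          · rw [if_pos (show (((1:Int) == 1 &&
                decide (cntKey ((1:Int) :: rest) 0 + e ≥ t))) = true by
                  simp only [hck]; simp; omega)]
            rw [if_pos (show e + 1 + (((segs (off + 1) rest).1.length : Nat) : Int) ≥ t from hC)]
            rw [if_pos (show e + (((off :: (segs (off + 1) rest).1).length : Nat) : Int) ≥ t by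
              simp only [List.length_cons]; push_cast; omega)]
            simp
          · rw [if_neg (show ¬ (((1:Int) == 1 &&
                decide (cntKey ((1:Int) :: rest) 0 + e ≥ t))) = true by
                  simp only [hck]; simp; omega)]
            rw [if_neg (show ¬ e + 1 + (((segs (off + 1) rest).1.length : Nat) : Int) ≥ t from hC)]
            rw [if_neg (show ¬ e + (((off :: (segs (off + 1) rest).1).length : Nat) : Int) ≥ t by
              simp only [List.length_cons]; push_cast; omega)]
            simp
        · rw [show (if v = 0 then (0:Int) else if v = 1 then e + 1 else e) = e by
            simp [hv0, hv1]]
          rw [ih t (off + 1) e]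
          have hsegs : segs off (v :: rest) = segs (off + 1) rest := by
            simp [segs, hv0, hv1]
          simp only [specGen, hsegs]
          rw [if_neg (by simp [hv1])]
          simp

theorem A_fold (t : Int) (l : List Int) : ∀ (off : Int) (u tmp : List Int),
    (let st := (PySem.List.enumerate l off).foldl (pvStepA t) (u, ((tmp.length : Nat) : Int), tmp)
     if st.2.1 ≥ t then st.1 ++ st.2.2 else st.1)
      = u ++ (if (((tmp.length + (segs off l).1.length : Nat) : Int)) ≥ t
              then tmp ++ (segs off l).1 else []) ++ (segs off l).2.flatMap (pvF t) := by
  induction l with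
  | nil =>
      intro off u tmp
      simp only [PySem.List.enumerate_nil, List.foldl_nil, segs, List.length_nil, Nat.add_zero,
        List.flatMap_nil, List.append_nil]
      split <;> simp
  | cons v rest ih =>
      intro off u tmp
      rw [PySem.List.enumerate_cons, List.foldl_cons]
      by_cases hv0 : v = 0
      · subst hv0
        rw [show pvStepA t (u, ((tmp.length : Nat) : Int), tmp) (off, 0)
            = ((if ((tmp.length : Nat) : Int) ≥ t then u ++ tmp else u),
               ((([] : List Int).length : Nat) : Int), ([] : List Int)) by simp [pvStepA]]
        rw [ih (off + 1) _ []]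
        have hsegs : segs off ((0:Int) :: rest)
            = ([], (segs (off + 1) rest).1 :: (segs (off + 1) rest).2) := by simp [segs]
        rw [hsegs]
        simp only [List.length_nil, Nat.zero_add, List.nil_append, List.flatMap_cons, pvF,
          Nat.add_zero]
        split_ifs <;> simp_all <;> omega
      · by_cases hv1 : v = 1
        · subst hv1
          rw [show pvStepA t (u, ((tmp.length : Nat) : Int), tmp) (off, 1)
              = (u, (((tmp ++ [off]).length : Nat) : Int), tmp ++ [off]) by
            simp [pvStepA]]
          rw [ih (off + 1) u (tmp ++ [off])]
          have hsegs : segs off ((1:Int) :: rest)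
              = (off :: (segs (off + 1) rest).1, (segs (off + 1) rest).2) := by simp [segs]
          rw [hsegs]
          simp only [List.length_append, List.length_cons, List.length_nil]
          have hcond : ((tmp.length + (1 + (segs (off + 1) rest).1.length) : Nat) : Int)
              = (((tmp.length + 1 + 0 + (segs (off + 1) rest).1.length : Nat) : Nat) : Int) := by
            push_cast; ring
          split_ifs <;> simp_all [List.append_assoc] <;> omega
        · rw [show pvStepA t (u, ((tmp.length : Nat) : Int), tmp) (off, v)
              = (u, ((tmp.length : Nat) : Int), tmp) by simp [pvStepA, hv0, hv1]]
          rw [ih (off + 1) u tmp]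
          have hsegs : segs off (v :: rest) = segs (off + 1) rest := by simp [segs, hv0, hv1]
          rw [hsegs]

theorem A_eq_specGen (l : List Int) (t : Int) : find_unshowed l t = specGen t 0 0 l := by
  have h := A_fold t l 0 [] []
  refine Eq.trans ?_ (h.trans ?_)
  · rfl
  · simp only [List.length_nil, Nat.zero_add, List.nil_append, specGen, pvF]
    split_ifs <;> simp_all <;> omega

def pvStepR (st : List Int × Int) (v : Int) : List Int × Int :=
  let zeros := if v == 0 then st.2 + 1 else st.2
  (st.1 ++ [zeros], zeros)

theorem pvStepR_eq (st : List Int × Int) (v : Int) :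
    pvStepR st v = (st.1 ++ [st.2 + (if v = 0 then 1 else 0)], st.2 + (if v = 0 then 1 else 0)) := by
  by_cases hv : v = 0 <;> simp [pvStepR, hv]

theorem rid_fold (l : List Int) : ∀ (acc : List Int) (z : Int),
    l.foldl pvStepR (acc, z)
      = (acc ++ (List.range l.length).map (fun i => z + zc l (i + 1)),
         z + ((l.count 0 : Nat) : Int)) := by
  induction l with
  | nil => intro acc z; simp
  | cons v rest ih =>
      intro acc z
      rw [List.foldl_cons, pvStepR_eq, ih]
      have hz1 : zc (v :: rest) 1 = (if v = 0 then 1 else 0) := by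
        rw [zc_cons_succ]; simp [zc_zero]
      simp only [Prod.mk.injEq]
      constructor
      · rw [List.length_cons, List.range_succ_eq_map, List.map_cons, List.map_map,
          List.append_assoc, List.singleton_append, hz1]
        congr 1
        congr 1
        apply List.map_congr_left
        intro i _
        simp only [Function.comp, Nat.succ_eq_add_one, zc_cons_succ]
        ring
      · rw [List.count_cons]
        by_cases hv : v = 0 <;> simp [hv] <;> push_cast <;> ring

theorem rid_eq (l : List Int) :
    (l.foldl pvStepR ([], 0)).1 = (List.range l.length).map (fun i => zc l (i + 1)) := by
  rw [rid_fold]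
  simp

theorem zc_succ_of_ne (l : List Int) (j : Nat) (h : l.getD j 0 ≠ 0) : zc l (j + 1) = zc l j := by
  have hj : j < l.length := by
    by_contra hj
    exact h (List.getD_eq_default l 0 (by omega))
  have hget : l.getD j 0 = l[j] := List.getD_eq_getElem l 0 hj
  unfold zc
  have htake : List.take (j + 1) l = List.take j l ++ [l[j]] := by
    rw [List.take_succ, List.getElem?_eq_getElem hj]
    simp
  have hne : ¬ (l[j] = 0) := by rw [← hget]; exact h
  rw [htake, List.count_append]
  simp [hne]

theorem enum_fm (l : List Int) (F : Int → Int → Bool) (G : Int → Int) :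
    ((PySem.List.enumerate l).filter (fun p => F p.1 p.2)).map (fun p => G p.1)
      = ((List.range l.length).filter (fun j : Nat => F (j : Int) (l.getD j 0))).map
          (fun j : Nat => G (j : Int)) := by
  rw [PySem.List.enumerate_eq_map_pyRange l 0]
  rw [show PySem.List.len l = ((l.length : Nat) : Int) by simp]
  rw [PySem.List.pyRange_zero_natCast, List.map_map, List.filter_map, List.map_map]
  have hpred : ((fun p : Int × Int => F p.1 p.2) ∘
        ((fun j : Int => (j, PySem.List.pyGetD l j 0)) ∘ (fun k : Nat => (k : Int))))
      = (fun j : Nat => F (j : Int) (l.getD j 0)) := by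
    funext j
    simp [Function.comp, PySem.List.pyGetD_natCast]
  rw [hpred]
  apply List.map_congr_left
  intro j _
  simp [Function.comp]

theorem B_eq_Pgen (l : List Int) (t : Int) : find_unshowed_alt l t = Pgen t 0 0 l := by
  have hrid : (l.foldl (fun (st : List Int × Int) v =>
      let zeros := if v == 0 then st.2 + 1 else st.2
      (st.1 ++ [zeros], zeros)) ([], 0)).1
      = (List.range l.length).map (fun i => zc l (i + 1)) := rid_eq l
  simp only [find_unshowed_alt]
  rw [hrid]
  have hkeys := enum_fm l (fun _ v => v == 1)
    (fun i => PySem.List.pyGetD ((List.range l.length).map (fun i => zc l (i + 1))) i 0)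
  beta_reduce at hkeys
  rw [hkeys]
  have hkeys2 : (((List.range l.length).filter (fun j : Nat => l.getD j 0 == 1)).map
        (fun j : Nat => PySem.List.pyGetD ((List.range l.length).map (fun i => zc l (i + 1))) (j : Int) 0))
      = ((List.range l.length).filter (fun j : Nat => l.getD j 0 == 1)).map (fun j : Nat => zc l j) := by
    apply List.map_congr_left
    intro j hj
    have hjr := List.mem_filter.1 hj
    have hjn : j < l.length := List.mem_range.1 hjr.1
    have h1 : l.getD j 0 = 1 := by simpa using hjr.2
    rw [PySem.List.pyGetD_natCast, PySem.List.getD_map_range _ _ _ _ hjn,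
      zc_succ_of_ne l j (by rw [h1]; omega)]
  rw [hkeys2]
  have hres := enum_fm l
    (fun i v => v == 1 && decide ((((((List.range l.length).filter
        (fun j : Nat => l.getD j 0 == 1)).map (fun j : Nat => zc l j)).foldl
        (fun (d : PySem.Dict Int Int) k => d.insert k (d.getD k 0 + 1))
        PySem.Dict.empty).getD (PySem.List.pyGetD ((List.range l.length).map
          (fun i => zc l (i + 1))) i 0) 0) ≥ t))
    (fun i => i)
  beta_reduce at hres
  rw [hres]
  have hP : Pgen t 0 0 l = ((List.range l.length).filter
      (fun j : Nat => l.getD j 0 == 1 && decide (cntKey l (zc l j) ≥ t))).map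
      (fun j : Nat => (j : Int)) := by
    unfold Pgen
    simp only [ite_self, add_zero, zero_add]
  rw [hP]
  congr 1
  apply List.filter_congr
  intro j hj
  have hjn : j < l.length := List.mem_range.1 hj
  cases hb : (l.getD j 0 == 1)
  · simp [hb]
  · have h1 : l.getD j 0 = 1 := by simpa using hb
    simp only [hb, Bool.true_and]
    rw [PySem.List.pyGetD_natCast, PySem.List.getD_map_range _ _ _ _ hjn,
      zc_succ_of_ne l j (by rw [h1]; omega)]
    rw [PySem.Dict.getD_foldl_insert_add_one]
    have : (PySem.Dict.empty : PySem.Dict Int Int).getD (zc l j) 0 = 0 := by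
      rfl
    rw [this, zero_add]
    rfl
-- ===== VERDICT (by name: the statement is the Claim_ definition above) =====
theorem find_unshowed_spec : Claim_equal_find_unshowed := by
  intro l t _
  show find_unshowed l t = find_unshowed_alt l t
  rw [A_eq_specGen, B_eq_Pgen, Pgen_eq_specGen]
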